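-- pv_equiv track=rewrite | github.com/sugan0tech/Projects | programming/python/susa/susa1.py | solution
-- ===== SOURCE A (Python) =====
-- def solution(A : [int], size : int) -> int:
--     boo = True
--     while boo:
--         small = min(A)
--         big = max(A)
--         if small%2 == 1:
--             A.remove(small)
--         if big%2 == 1:
--             A.remove(big)
--         if (small%2 == 0) and (big%2 == 0):
--             return small + big
-- ===== SOURCE B (Python) =====
-- def solution(A : [int], size : int) -> int:
--     evens = [x for x in A if x % 2 == 0]
--     return min(evens) + max(evens)
-- ===== Notes on version B (the rewrite author's own statement) =====
-- stated objective: simpler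
-- what changed: B filters the even elements once and returns min(evens)+max(evens), replacing A's destructive while-loop that repeatedly rescans the list with min/max and removes odd extremes; B also does not mutate the input list.
import Mathlib
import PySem

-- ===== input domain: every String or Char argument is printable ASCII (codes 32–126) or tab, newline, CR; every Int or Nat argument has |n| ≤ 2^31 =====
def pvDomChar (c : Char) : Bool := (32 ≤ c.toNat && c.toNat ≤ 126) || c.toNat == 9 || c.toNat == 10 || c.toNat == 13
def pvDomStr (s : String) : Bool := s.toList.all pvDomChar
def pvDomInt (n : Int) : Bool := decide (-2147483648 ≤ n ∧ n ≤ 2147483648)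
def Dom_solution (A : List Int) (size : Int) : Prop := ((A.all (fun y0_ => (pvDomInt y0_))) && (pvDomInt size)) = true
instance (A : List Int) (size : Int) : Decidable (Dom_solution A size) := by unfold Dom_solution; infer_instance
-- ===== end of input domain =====

-- B replaces A's destructive while-loop of repeated min/max scans with one filter of the
-- even elements plus min+max of that filter (simpler; and B does not mutate its argument,
-- while A removes elements from the caller's list — the claim is about the return value only).

-- ===== PORT A =====
-- the while-loop; fuel bounds the iterations (each non-returning iteration removes an
-- element, so length+1 fuel is never exhausted on inputs where A terminates); none = ValueError
def solutionLoop : Nat → List Int → Option Int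
  | 0, _ => none
  | fuel+1, lst =>
    match PySem.List.min? lst (fun x => x), PySem.List.max? lst (fun x => x) with
    | some small, some big =>
      match (if PySem.Int.mod small 2 == 1 then PySem.List.remove? lst small else some lst) with
      | none => none
      | some l1 =>
        match (if PySem.Int.mod big 2 == 1 then PySem.List.remove? l1 big else some l1) with
        | none => none
        | some l2 =>
          if PySem.Int.mod small 2 == 0 && PySem.Int.mod big 2 == 0 then some (small + big)
          else solutionLoop fuel l2
    | _, _ => none

def solution (A : List Int) (size : Int) : Int :=
  (solutionLoop (A.length + 1) A).getD 0   -- .getD 0 is unreachable under Pre_solution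

-- ===== PORT B =====
def solution_alt (A : List Int) (size : Int) : Int :=
  let evens := A.filter (fun x => PySem.Int.mod x 2 == 0)
  match PySem.List.min? evens (fun x => x), PySem.List.max? evens (fun x => x) with
  | some a, some b => a + b
  | _, _ => 0      -- unreachable under Pre_solution (Python: ValueError from min([]))

-- ===== PRECONDITION & SPEC =====
-- A (and B) raise ValueError exactly when the list contains no even element (incl. empty list).
def Pre_solution (A : List Int) (size : Int) : Prop := ∃ x ∈ A, PySem.Int.mod x 2 = 0
instance (A : List Int) (size : Int) : Decidable (Pre_solution A size) := by
  unfold Pre_solution; infer_instance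

def pvWitness_solution : List Int × Int := ([3, 8, 5, 2, 7], 5)

def Spec_solution (A : List Int) (size : Int) (out : Int) : Prop := out = solution_alt A size
instance (A : List Int) (size : Int) (out : Int) : Decidable (Spec_solution A size out) := by
  unfold Spec_solution; infer_instance

-- ===== CLAIM (what is proved, stated in full; the proofs are below) =====
def Claim_equal_solution : Prop := ∀ (A : List Int) (size : Int), Dom_solution A size → Pre_solution A size → Spec_solution A size (solution A size)

-- ===== LEMMAS AND PROOFS =====

theorem mod2_eq_emod (x : Int) : PySem.Int.mod x 2 = x % 2 :=
  PySem.Int.mod_eq_emod_of_pos (by norm_num)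

theorem mod2_cases (x : Int) : PySem.Int.mod x 2 = 0 ∨ PySem.Int.mod x 2 = 1 := by
  rw [mod2_eq_emod]; omega

-- erasing an element that fails the predicate leaves the filter unchanged
theorem filter_erase_of_neg {p : Int → Bool} {a : Int} (h : p a = false) :
    ∀ (l : List Int), (l.erase a).filter p = l.filter p := by
  intro l
  induction l with
  | nil => rfl
  | cons x t ih =>
    by_cases hx : x = a
    · subst hx
      simp [List.erase_cons_head, h]
    · rw [List.erase_cons_tail (by simpa using hx)]
      simp [List.filter_cons, ih]

-- a member below (resp. above) every element is THE value min? (resp. max?) returns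
theorem min?_id_eq_of {l : List Int} {m : Int} (hm : m ∈ l) (hle : ∀ x ∈ l, m ≤ x) :
    PySem.List.min? l (fun x => x) = some m := by
  cases hmin : PySem.List.min? l (fun x => x) with
  | none =>
    rw [PySem.List.min?_eq_none_iff] at hmin
    subst hmin; cases hm
  | some m' =>
    have h1 := PySem.List.min?_mem hmin
    have h2 := PySem.List.min?_isMin hmin m hm
    have h3 := hle m' h1
    simp only at h2
    exact congrArg some (le_antisymm h2 h3)

theorem max?_id_eq_of {l : List Int} {m : Int} (hm : m ∈ l) (hle : ∀ x ∈ l, x ≤ m) :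
    PySem.List.max? l (fun x => x) = some m := by
  cases hmax : PySem.List.max? l (fun x => x) with
  | none =>
    rw [PySem.List.max?_eq_none_iff] at hmax
    subst hmax; cases hm
  | some m' =>
    have h1 := PySem.List.max?_mem hmax
    have h2 := PySem.List.max?_isMax hmax m hm
    have h3 := hle m' h1
    simp only at h2
    exact congrArg some (le_antisymm h3 h2)

-- the core invariant: while the even elements are nonempty, the loop returns
-- min(evens) + max(evens), i.e. exactly B's value
theorem solutionLoop_eq (fuel : Nat) :
    ∀ (lst : List Int), lst.length < fuel →
      (∃ x ∈ lst, PySem.Int.mod x 2 = 0) →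
      solutionLoop fuel lst = some (solution_alt lst 0) := by
  induction fuel with
  | zero => intro lst h; omega
  | succ n ih =>
    intro lst hlen ⟨e, he, heEven⟩
    have hne : lst ≠ [] := by intro h; subst h; cases he
    -- min and max of lst exist
    obtain ⟨small, hsmall⟩ : ∃ m, PySem.List.min? lst (fun x => x) = some m := by
      cases h : PySem.List.min? lst (fun x => x) with
      | none => exact absurd ((PySem.List.min?_eq_none_iff _ _).mp h) hne
      | some m => exact ⟨m, rfl⟩
    obtain ⟨big, hbig⟩ : ∃ m, PySem.List.max? lst (fun x => x) = some m := by
      cases h : PySem.List.max? lst (fun x => x) with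
      | none => exact absurd ((PySem.List.max?_eq_none_iff _ _).mp h) hne
      | some m => exact ⟨m, rfl⟩
    have hsm := PySem.List.min?_mem hsmall
    have hsmin : ∀ x ∈ lst, small ≤ x := fun x hx => PySem.List.min?_isMin hsmall x hx
    have hbm := PySem.List.max?_mem hbig
    have hbmax : ∀ x ∈ lst, x ≤ big := fun x hx => PySem.List.max?_isMax hbig x hx
    rcases mod2_cases small with hS | hS
    · rcases mod2_cases big with hB | hB
      · -- both even: the loop returns small + big, and B's min/max over evens are small/big
        have hsmE : small ∈ lst.filter (fun x => PySem.Int.mod x 2 == 0) :=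
          List.mem_filter.mpr ⟨hsm, by rw [hS]; rfl⟩
        have hbmE : big ∈ lst.filter (fun x => PySem.Int.mod x 2 == 0) :=
          List.mem_filter.mpr ⟨hbm, by rw [hB]; rfl⟩
        have hminE := min?_id_eq_of hsmE (fun x hx => hsmin x (List.mem_of_mem_filter hx))
        have hmaxE := max?_id_eq_of hbmE (fun x hx => hbmax x (List.mem_of_mem_filter hx))
        simp only [solutionLoop, hsmall, hbig, hS, hB]
        norm_num
        simp only [solution_alt, hminE, hmaxE]
      · -- big odd: remove big; small stays (small even), evens unchanged
        have hrem : PySem.List.remove? lst big = some (lst.erase big) :=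
          PySem.List.remove?_eq_some_erase lst big hbm
        have hfil : (lst.erase big).filter (fun x => PySem.Int.mod x 2 == 0)
            = lst.filter (fun x => PySem.Int.mod x 2 == 0) :=
          filter_erase_of_neg (by rw [hB]; rfl) lst
        have hlen' : (lst.erase big).length < n := by
          have := List.length_erase_of_mem hbm
          have hpos : 0 < lst.length := List.length_pos_of_mem hbm
          omega
        have hrec := ih (lst.erase big) hlen'
          ⟨e, by
            have hne' : e ≠ big := by intro h; subst h; rw [heEven] at hB; omega
            exact (List.mem_erase_of_ne hne').mpr he, heEven⟩
        simp only [solutionLoop, hsmall, hbig, hS, hB]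
        norm_num
        simp only [hrem]
        rw [hrec]
        simp only [solution_alt, hfil]
    · -- small odd: remove small
      have hrem : PySem.List.remove? lst small = some (lst.erase small) :=
        PySem.List.remove?_eq_some_erase lst small hsm
      have hfil : (lst.erase small).filter (fun x => PySem.Int.mod x 2 == 0)
          = lst.filter (fun x => PySem.Int.mod x 2 == 0) :=
        filter_erase_of_neg (by rw [hS]; rfl) lst
      have heS : e ≠ small := by intro h; subst h; rw [heEven] at hS; omega
      rcases mod2_cases big with hB | hB
      · -- big even: only small removed, recurse
        have hlen' : (lst.erase small).length < n := by
          have := List.length_erase_of_mem hsm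
          have hpos : 0 < lst.length := List.length_pos_of_mem hsm
          omega
        have hrec := ih (lst.erase small) hlen'
          ⟨e, (List.mem_erase_of_ne heS).mpr he, heEven⟩
        simp only [solutionLoop, hsmall, hbig, hS, hB]
        norm_num
        simp only [hrem]
        rw [hrec]
        simp only [solution_alt, hfil]
      · -- both odd: small ≠ big (else all elements equal the odd value, no even), remove both
        have hsb : small ≠ big := by
          intro h
          subst h
          have h1 := hsmin e he
          have h2 := hbmax e he
          have : e = small := by omega
          subst this
          rw [heEven] at hS; omega
        have hbm' : big ∈ lst.erase small := (List.mem_erase_of_ne (Ne.symm hsb)).mpr hbm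
        have hrem2 : PySem.List.remove? (lst.erase small) big
            = some ((lst.erase small).erase big) :=
          PySem.List.remove?_eq_some_erase (lst.erase small) big hbm'
        have hfil2 : ((lst.erase small).erase big).filter (fun x => PySem.Int.mod x 2 == 0)
            = lst.filter (fun x => PySem.Int.mod x 2 == 0) := by
          rw [filter_erase_of_neg (by rw [hB]; rfl) (lst.erase small), hfil]
        have hlen' : ((lst.erase small).erase big).length < n := by
          have h1 := List.length_erase_of_mem hsm
          have h2 := List.length_erase_of_mem hbm'
          have hpos : 0 < lst.length := List.length_pos_of_mem hsm
          have hpos2 : 0 < (lst.erase small).length := List.length_pos_of_mem hbm'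
          omega
        have heB : e ≠ big := by intro h; subst h; rw [heEven] at hB; omega
        have hrec := ih ((lst.erase small).erase big) hlen'
          ⟨e, (List.mem_erase_of_ne heB).mpr ((List.mem_erase_of_ne heS).mpr he), heEven⟩
        simp only [solutionLoop, hsmall, hbig, hS, hB]
        norm_num
        simp only [hrem, hrem2]
        rw [hrec]
        simp only [solution_alt, hfil2]

-- solution_alt ignores the size argument
theorem solution_alt_size (A : List Int) (s t : Int) : solution_alt A s = solution_alt A t := rfl

-- ===== VERDICT (by name: the statement is the Claim_ definition above) =====
theorem solution_spec : Claim_equal_solution := by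
  intro A size _ hpre
  unfold Spec_solution solution
  rw [solutionLoop_eq (A.length + 1) A (by omega) hpre]
  rw [solution_alt_size A 0 size]
  rfl
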